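-- pv_equiv track=rewrite | github.com/a-p-n/CTF-solutions | 2023/LakeCTF/choices/solve.py | gen_rest
-- ===== SOURCE A (Python) =====
-- def gen_rest(inside, group):
--     group_dict = {c: group.count(c) for c in set(group)}
--     out = ""
--     for c in inside:
--         if c not in group_dict:
--             out += c * inside[c]
--         else:
--             out += c * (inside[c] - group_dict[c])
--     return out
-- ===== SOURCE B (Python) =====
-- def gen_rest(inside, group):
--     # Explicit multiset of tokens: each key repeated its count; each group
--     # character removes one matching token; join what survives.
--     tokens = [c for c, n in inside.items() for _ in range(n)]
--     for ch in group:
--         try: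
--             tokens.remove(ch)
--         except ValueError:
--             pass
--     return "".join(tokens)
-- ===== Notes on version B (the rewrite author's own statement) =====
-- stated objective: alternative
-- what changed: B does no counting or subtraction at all: it expands inside into an explicit token multiset (each key repeated its count), lets every character of group consume one matching token via list.remove, and joins the surviving tokens; A's group-count dict and per-key if/else subtraction disappear.
import Mathlib
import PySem

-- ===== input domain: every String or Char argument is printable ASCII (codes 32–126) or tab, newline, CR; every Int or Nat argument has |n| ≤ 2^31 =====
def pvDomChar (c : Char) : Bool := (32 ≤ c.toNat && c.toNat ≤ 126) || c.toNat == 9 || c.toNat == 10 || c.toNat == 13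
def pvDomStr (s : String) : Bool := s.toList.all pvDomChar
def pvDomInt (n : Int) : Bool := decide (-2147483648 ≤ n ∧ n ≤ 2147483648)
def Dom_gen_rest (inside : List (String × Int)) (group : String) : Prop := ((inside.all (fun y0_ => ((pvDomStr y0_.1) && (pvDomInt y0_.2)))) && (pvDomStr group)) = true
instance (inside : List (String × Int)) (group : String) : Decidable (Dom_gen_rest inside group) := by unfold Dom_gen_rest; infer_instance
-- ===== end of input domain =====

-- B replaces A's group-count dictionary and per-key subtraction branch with an explicit token
-- multiset: each key expanded into repeated tokens, one token consumed per group character via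
-- list.remove, survivors joined (objective: alternative algorithm, no counting at all).

-- ===== PORT A =====
-- 'inside' is a Python dict: the association list is read through PySem.Dict.ofList (insertion
-- order, last value wins), exactly the dict the Python caller passes.
def gen_rest (inside : List (String × Int)) (group : String) : String :=
  let d : PySem.Dict String Int := PySem.Dict.ofList inside
  -- group_dict = {c: group.count(c) for c in set(group)}  (dict only looked up afterwards)
  let group_dict : PySem.Dict String Int :=
    (PySem.Set.ofList group.toList).foldl
      (fun gd c => gd.insert (String.ofList [c]) ((PySem.Str.count group (String.ofList [c]) : Int)))
      PySem.Dict.empty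
  -- for c in inside: out += c * inside[c]  /  c * (inside[c] - group_dict[c])
  let out : List Char := d.items.foldl
    (fun out p =>
      out ++ (if group_dict.contains p.1 = false then
                PySem.List.pyRepeat p.1.toList (d.getD p.1 0)
              else
                PySem.List.pyRepeat p.1.toList (d.getD p.1 0 - group_dict.getD p.1 0))) []
  String.ofList out

-- ===== PORT B =====
def gen_rest_alt (inside : List (String × Int)) (group : String) : String :=
  -- tokens = [c for c, n in inside.items() for _ in range(n)]
  let tokens : List String :=
    (PySem.Dict.ofList inside).items.flatMap (fun p => PySem.List.pyRepeat [p.1] p.2)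
  -- for ch in group: try: tokens.remove(ch) except ValueError: pass
  let tokens : List String := group.toList.foldl
    (fun toks ch => (PySem.List.remove? toks (String.ofList [ch])).getD toks) tokens
  -- "".join(tokens)
  PySem.Str.join "" tokens

-- ===== PRECONDITION & SPEC =====
def Spec_gen_rest (inside : List (String × Int)) (group : String) (out : String) : Prop := out = gen_rest_alt inside group
instance (inside : List (String × Int)) (group : String) (out : String) : Decidable (Spec_gen_rest inside group out) := by unfold Spec_gen_rest; infer_instance

-- ===== CLAIM (what is proved, stated in full; the proofs are below) =====
def Claim_equal_gen_rest : Prop := ∀ (inside : List (String × Int)) (group : String), Dom_gen_rest inside group → Spec_gen_rest inside group (gen_rest inside group)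

-- ===== LEMMAS AND PROOFS =====

-- str.count with a single-character needle is the character count (specific unfolding of count.go).
theorem pv_cnt_go (c : Char) : ∀ (s : List Char) (fuel acc : Nat), s.length ≤ fuel →
    PySem.Chars.count.go [c] fuel s acc = acc + s.count c
  | [], fuel, acc, _ => by cases fuel <;> simp [PySem.Chars.count.go]
  | _ :: _, 0, _, hle => by simp at hle
  | h :: t, fuel + 1, acc, hle => by
    rw [PySem.Chars.count.go]
    by_cases hc : c = h
    · subst hc
      simp [List.isPrefixOf, pv_cnt_go c t fuel (acc + 1) (by simpa using hle)]
      omega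
    · simp [List.isPrefixOf, hc, pv_cnt_go c t fuel acc (by simpa using hle), Ne.symm hc]

theorem pv_count_singleton (s : List Char) (c : Char) :
    PySem.Chars.count s [c] = s.count c := by
  simpa [PySem.Chars.count] using pv_cnt_go c s s.length 0 le_rfl

theorem pv_join_nil (l : List (List Char)) : PySem.Chars.join [] l = l.flatten := by
  simp only [PySem.Chars.join, List.intercalate]
  induction l with
  | nil => rfl
  | cons x t ih => cases t <;> simp_all [List.intersperse]

theorem pv_ofList_singleton_inj {a b : Char} : String.ofList [a] = String.ofList [b] ↔ a = b := by
  constructor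
  · intro h; have := congrArg String.toList h; simpa using this
  · rintro rfl; rfl

-- A's group_dict: its items are exactly set(group) mapped to (char, group.count(char)).
theorem pv_gd_items (group : String) :
    ((PySem.Set.ofList group.toList).foldl
      (fun gd c => gd.insert (String.ofList [c]) ((PySem.Str.count group (String.ofList [c]) : Int)))
      PySem.Dict.empty).items
    = (PySem.Set.ofList group.toList).map
        (fun c => (String.ofList [c], ((PySem.Str.count group (String.ofList [c])) : Int))) := by
  rw [PySem.Dict.items_foldl_insert_fresh _ _ _ _ (fun a _ => by simp)
    ((PySem.Set.nodup_ofList group.toList).map (fun a b h => pv_ofList_singleton_inj.mp h))]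
  rw [show (PySem.Dict.empty : PySem.Dict String Int).items = [] from rfl, List.nil_append]

theorem pv_gd_keys (group : String) :
    ((PySem.Set.ofList group.toList).foldl
      (fun gd c => gd.insert (String.ofList [c]) ((PySem.Str.count group (String.ofList [c]) : Int)))
      PySem.Dict.empty).keys
    = (PySem.Set.ofList group.toList).map (fun c => String.ofList [c]) := by
  simp only [PySem.Dict.keys, pv_gd_items, List.map_map]
  rfl

-- removal skips a prefix that does not contain the value
theorem pv_remove_append (v : String) : ∀ (xs ys : List String), v ∉ xs →
    PySem.List.remove? (xs ++ ys) v = (PySem.List.remove? ys v).map (xs ++ ·) := by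
  intro xs
  induction xs with
  | nil => intro ys _; simp
  | cons x xs ih =>
    intro ys hv
    have hx : x ≠ v := by rintro rfl; simp at hv
    rw [List.cons_append, PySem.List.remove?_cons_of_ne _ hx,
      ih ys (fun h => hv (List.mem_cons_of_mem _ h)), Option.map_map]
    rfl

-- one list.remove on a union of constant blocks over distinct keys: the matching block (if any)
-- loses one element, everything else is untouched (Nat subtraction absorbs the absent case)
theorem pv_remove_blocks (s : String) (f : String → Nat) : ∀ (keys : List String), keys.Nodup →
    (PySem.List.remove? (keys.flatMap fun c => List.replicate (f c) c) s).getD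
      (keys.flatMap fun c => List.replicate (f c) c)
    = keys.flatMap fun c => List.replicate (f c - if c = s then 1 else 0) c := by
  intro keys
  induction keys with
  | nil => intro _; simp [PySem.List.remove?]
  | cons k ks ih =>
    intro hnd
    obtain ⟨hk, hnd'⟩ := List.nodup_cons.mp hnd
    rw [List.flatMap_cons, List.flatMap_cons]
    by_cases hks : k = s
    · subst hks
      -- tail blocks are unaffected: no key of ks equals k
      have htail : (ks.flatMap fun c => List.replicate (f c - if c = k then 1 else 0) c)
          = ks.flatMap fun c => List.replicate (f c) c := by
        rw [List.flatMap_def, List.flatMap_def]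
        refine congrArg List.flatten (List.map_congr_left (fun c hc => ?_))
        have : c ≠ k := fun h => hk (h ▸ hc)
        rw [if_neg this, Nat.sub_zero]
      cases hfk : f k with
      | zero =>
        have hmem : k ∉ (ks.flatMap fun c => List.replicate (f c) c) := by
          intro hm
          obtain ⟨c, hc, hrc⟩ := List.mem_flatMap.mp hm
          exact hk ((List.eq_of_mem_replicate hrc) ▸ hc)
        rw [List.replicate_zero, List.nil_append,
          (PySem.List.remove?_eq_none_iff _ _).mpr hmem]
        simp [htail]
      | succ n =>
        rw [List.replicate_succ, List.cons_append, PySem.List.remove?_cons_self]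
        simp [htail]
    · have hblk : s ∉ List.replicate (f k) k :=
        fun h => hks (List.eq_of_mem_replicate h).symm
      rw [pv_remove_append s _ _ hblk, if_neg hks, Nat.sub_zero]
      cases hrem : PySem.List.remove? (ks.flatMap fun c => List.replicate (f c) c) s with
      | none =>
        have := ih hnd'
        rw [hrem] at this
        simp only [Option.getD_none] at this ⊢
        rw [Option.map_none, Option.getD_none, this]
      | some r =>
        have := ih hnd'
        rw [hrem] at this
        simp only [Option.getD_some] at this ⊢
        rw [Option.map_some, Option.getD_some, this]

-- B's whole removal loop: each key keeps its count minus the number of matching group characters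
theorem pv_fold_remove (keys : List String) (hnd : keys.Nodup) :
    ∀ (cs : List Char) (f : String → Nat),
    cs.foldl (fun toks ch => (PySem.List.remove? toks (String.ofList [ch])).getD toks)
        (keys.flatMap fun c => List.replicate (f c) c)
    = keys.flatMap fun c =>
        List.replicate (f c - cs.countP (fun ch => String.ofList [ch] == c)) c := by
  intro cs
  induction cs with
  | nil => intro f; simp
  | cons ch cs ih =>
    intro f
    rw [List.foldl_cons, pv_remove_blocks (String.ofList [ch]) f keys hnd,
      ih (fun c => f c - if c = String.ofList [ch] then 1 else 0)]
    rw [List.flatMap_def, List.flatMap_def]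
    refine congrArg List.flatten (List.map_congr_left (fun c _ => ?_))
    congr 1
    rw [List.countP_cons]
    by_cases hc : c = String.ofList [ch]
    · subst hc; simp; omega
    · have : (String.ofList [ch] == c) = false := beq_eq_false_iff_ne.mpr (Ne.symm hc)
      simp [hc, this]

-- flattening the token blocks key by key
theorem pv_flatten_blocks (m : String → Nat) : ∀ (keys : List String),
    ((keys.flatMap fun c => List.replicate (m c) c).map String.toList).flatten
    = (keys.map fun c => (List.replicate (m c) c.toList).flatten).flatten := by
  intro keys
  induction keys with
  | nil => rfl
  | cons k ks ih =>
    rw [List.flatMap_cons, List.map_append, List.flatten_append, ih, List.map_cons,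
      List.flatten_cons, List.map_replicate]

-- ===== VERDICT (by name: the statement is the Claim_ definition above) =====
theorem gen_rest_spec : Claim_equal_gen_rest := by
  intro inside group _dom
  unfold Spec_gen_rest gen_rest gen_rest_alt
  dsimp only
  set d : PySem.Dict String Int := PySem.Dict.ofList inside with hd
  set gd : PySem.Dict String Int :=
    (PySem.Set.ofList group.toList).foldl
      (fun gd c => gd.insert (String.ofList [c]) ((PySem.Str.count group (String.ofList [c]) : Int)))
      PySem.Dict.empty with hgd
  have hnd : d.keys.Nodup := PySem.Dict.nodup_keys_ofList inside
  -- B side: tokens as blocks over the (nodup) keys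
  have htok : d.items.flatMap (fun p => PySem.List.pyRepeat [p.1] p.2)
      = d.keys.flatMap fun c => List.replicate ((d.getD c 0).toNat) c := by
    rw [PySem.Dict.items_eq_map_keys d hnd 0, List.flatMap_map]
    rw [List.flatMap_def, List.flatMap_def]
    refine congrArg List.flatten (List.map_congr_left (fun c _ => ?_))
    exact PySem.List.pyRepeat_singleton c (d.getD c 0)
  rw [htok, pv_fold_remove d.keys hnd group.toList (fun c => (d.getD c 0).toNat)]
  -- B side as ofList of a flatten
  have hjoin : ∀ (l : List String),
      PySem.Str.join "" l = String.ofList ((l.map String.toList).flatten) := by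
    intro l
    simp [PySem.Str.join, pv_join_nil]
  rw [hjoin, pv_flatten_blocks]
  -- A side as ofList of a flatten
  rw [PySem.List.foldl_append_eq_flatMap, List.nil_append, List.flatMap_def,
    PySem.Dict.items_eq_map_keys d hnd 0, List.map_map]
  refine congrArg String.ofList (congrArg List.flatten (List.map_congr_left (fun k hk => ?_)))
  simp only [Function.comp_apply]
  -- per key: A's branch value = B's surviving block, as char lists
  have hblk : ∀ (n : Int), PySem.List.pyRepeat k.toList
        (n - (group.toList.countP (fun ch => String.ofList [ch] == k) : Int))
      = (List.replicate (n.toNat - group.toList.countP (fun ch => String.ofList [ch] == k))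
          k.toList).flatten := by
    intro n
    show (List.replicate
      (n - (group.toList.countP (fun ch => String.ofList [ch] == k) : Int)).toNat k.toList).flatten = _
    congr 2
    omega
  by_cases hg : gd.contains k = true
  · rw [if_neg (by simp [hg])]
    -- k is a one-character key occurring in group: group_dict value = its count in group = cnt k
    obtain ⟨c, hcmem, hck⟩ := by
      have := (PySem.Dict.contains_iff_mem_keys gd k).mp hg
      rw [hgd, pv_gd_keys] at this
      exact List.mem_map.mp this
    have hgetD : gd.getD k 0 = ((PySem.Str.count group (String.ofList [c])) : Int) := by
      refine PySem.Dict.getD_of_mem_items gd ?_ ?_ 0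
      · rw [hgd, pv_gd_items]
        exact List.mem_map.mpr ⟨c, hcmem, by rw [hck]⟩
      · rw [hgd, pv_gd_keys]
        exact ((PySem.Set.nodup_ofList group.toList).map
          (fun a b h => pv_ofList_singleton_inj.mp h))
    have hcount : PySem.Str.count group (String.ofList [c]) = group.toList.count c := by
      rw [PySem.Str.count_eq]
      have : (String.ofList [c]).toList = [c] := by simp
      rw [this, pv_count_singleton]
    have hcountP : group.toList.countP (fun ch => String.ofList [ch] == k)
        = group.toList.count c := by
      subst hck
      simp only [List.count]
      refine List.countP_congr (fun a _ => ?_)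
      by_cases hac : a = c
      · subst hac; simp
      · have h1 : (String.ofList [a] == String.ofList [c]) = false :=
          beq_eq_false_iff_ne.mpr (fun h => hac (pv_ofList_singleton_inj.mp h))
        have h2 : (a == c) = false := by simp [hac]
        rw [h1, h2]
    rw [hgetD, hcount, ← hcountP]
    exact hblk (d.getD k 0)
  · rw [if_pos (by simp at hg; simp [hg])]
    -- k never occurs in group: no token is removed
    have hz : group.toList.countP (fun ch => String.ofList [ch] == k) = 0 := by
      refine List.countP_eq_zero.mpr (fun ch hch => ?_)
      simp only [beq_iff_eq]
      intro h
      apply hg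
      rw [PySem.Dict.contains_iff_mem_keys, hgd, pv_gd_keys]
      exact List.mem_map.mpr ⟨ch, (PySem.Set.mem_ofList group.toList ch).mpr hch, h⟩
    have h := hblk (d.getD k 0)
    rw [hz] at h ⊢
    simpa using h
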